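-- pv_equiv track=rewrite | github.com/MGYBY/river1d_practice | misc/year-cycle-plot/split_hq_by_year_current.py | split_into_year_blocks
-- ===== SOURCE A (Python) =====
-- def split_into_year_blocks(rows: list[tuple[int, str]]) -> list[list[tuple[int, str]]]:
--     """Split the merged time series into yearly blocks using the day reset."""
--     if not rows:
--         return []
--
--     blocks: list[list[tuple[int, str]]] = []
--     current_block: list[tuple[int, str]] = [rows[0]]
--
--     for day, discharge in rows[1:]:
--         previous_day = current_block[-1][0]
--
--         if day < previous_day:
--             blocks.append(current_block)
--             current_block = []
--
--         current_block.append((day, discharge))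
--
--     blocks.append(current_block)
--     return blocks
-- ===== SOURCE B (Python) =====
-- def split_into_year_blocks(rows: list[tuple[int, str]]) -> list[list[tuple[int, str]]]:
--     """Build the blocks back-to-front: walk the rows in reverse and prepend each
--     row to the front block unless the following day is smaller (a year reset)."""
--     blocks: list[list[tuple[int, str]]] = []
--     for day, discharge in reversed(rows):
--         if blocks and blocks[0][0][0] >= day:
--             blocks[0].insert(0, (day, discharge))
--         else:
--             blocks.insert(0, [(day, discharge)])
--     return blocks
-- ===== Notes on version B (the rewrite author's own statement) =====
-- stated objective: alternative
-- what changed: B traverses the rows in reverse in a single pass, prepending each row to the front block or starting a new front block at a reset, instead of A's forward accumulator that flushes the current block on each reset.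
import Mathlib
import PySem

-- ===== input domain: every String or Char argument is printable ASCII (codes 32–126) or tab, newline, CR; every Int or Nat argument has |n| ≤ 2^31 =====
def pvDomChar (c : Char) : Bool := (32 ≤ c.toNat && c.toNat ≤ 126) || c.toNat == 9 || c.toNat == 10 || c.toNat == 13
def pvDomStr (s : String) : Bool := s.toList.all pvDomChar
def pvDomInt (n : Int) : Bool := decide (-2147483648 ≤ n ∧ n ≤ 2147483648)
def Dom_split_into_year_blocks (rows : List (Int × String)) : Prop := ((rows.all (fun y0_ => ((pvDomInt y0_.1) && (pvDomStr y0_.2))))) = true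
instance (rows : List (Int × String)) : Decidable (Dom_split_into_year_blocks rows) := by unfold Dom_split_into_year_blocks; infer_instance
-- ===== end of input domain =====

-- B builds the same blocks by one reverse pass (prepend to the front block / start a new front block); alternative decomposition, same result.

-- ===== PORT A =====
-- loop body of A: read current_block[-1][0], flush on a reset, append the row
def pvAStep (st : List (List (Int × String)) × List (Int × String))
    (rd : Int × String) : List (List (Int × String)) × List (Int × String) :=
  let prev := (st.2.getLast?.getD (0, "")).1
  let st := if rd.1 < prev then (st.1 ++ [st.2], ([] : List (Int × String))) else st
  (st.1, st.2 ++ [rd])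

def split_into_year_blocks (rows : List (Int × String)) : List (List (Int × String)) :=
  match rows with
  | [] => []
  | r0 :: rest =>
    let st := rest.foldl pvAStep ([], [r0])
    st.1 ++ [st.2]

-- ===== PORT B =====
-- loop body of B: prepend the row to the front block, or open a new front block
def pvBStep (blocks : List (List (Int × String))) (rd : Int × String) :
    List (List (Int × String)) :=
  match blocks with
  | (h :: b) :: rest => if h.1 ≥ rd.1 then (rd :: h :: b) :: rest else [rd] :: (h :: b) :: rest
  | _ => [rd] :: blocks

def split_into_year_blocks_alt (rows : List (Int × String)) : List (List (Int × String)) :=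
  rows.reverse.foldl pvBStep []

-- ===== PRECONDITION & SPEC =====
def Spec_split_into_year_blocks (rows : List (Int × String)) (out : List (List (Int × String))) : Prop := out = split_into_year_blocks_alt rows
instance (rows : List (Int × String)) (out : List (List (Int × String))) : Decidable (Spec_split_into_year_blocks rows out) := by unfold Spec_split_into_year_blocks; infer_instance

-- ===== CLAIM (what is proved, stated in full; the proofs are below) =====
def Claim_equal_split_into_year_blocks : Prop := ∀ (rows : List (Int × String)), Dom_split_into_year_blocks rows → Spec_split_into_year_blocks rows (split_into_year_blocks rows)

-- ===== LEMMAS AND PROOFS =====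

lemma alt_cons (x : Int × String) (xs : List (Int × String)) :
    split_into_year_blocks_alt (x :: xs) = pvBStep (split_into_year_blocks_alt xs) x := by
  simp [split_into_year_blocks_alt, List.reverse_cons, List.foldl_append]

-- every result of pvBStep has a nonempty front block
lemma bstep_shape (blocks : List (List (Int × String))) (rd : Int × String) :
    ∃ h b rest, pvBStep blocks rd = (h :: b) :: rest := by
  unfold pvBStep
  match blocks with
  | (h :: b) :: rest => by_cases hc : h.1 ≥ rd.1 <;> simp [hc]
  | [] => exact ⟨_, _, _, rfl⟩
  | [] :: rest => exact ⟨_, _, _, rfl⟩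

lemma alt_shape (xs : List (Int × String)) (hne : xs ≠ []) :
    ∃ h b rest, split_into_year_blocks_alt xs = (h :: b) :: rest := by
  match xs with
  | [] => exact absurd rfl hne
  | x :: xs => rw [alt_cons]; exact bstep_shape _ _

-- attach a (forward) current block in front of an already-split tail
def pvGlue (cur : List (Int × String)) (bs : List (List (Int × String))) :
    List (List (Int × String)) :=
  match bs with
  | [] => [cur]
  | b :: rest =>
      if ((b.headD (0, "")).1 < (cur.getLast?.getD (0, "")).1) then cur :: b :: rest
      else (cur ++ b) :: rest

lemma pv_main : ∀ (xs : List (Int × String)) (blocks : List (List (Int × String)))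
    (cur : List (Int × String)),
    (xs.foldl pvAStep (blocks, cur)).1 ++ [(xs.foldl pvAStep (blocks, cur)).2]
      = blocks ++ pvGlue cur (split_into_year_blocks_alt xs) := by
  intro xs
  induction xs with
  | nil => intro blocks cur; simp [split_into_year_blocks_alt, pvGlue]
  | cons x xs ih =>
    intro blocks cur
    rw [alt_cons]
    by_cases hx : x.1 < (cur.getLast?.getD (0, "")).1
    · have hstep : pvAStep (blocks, cur) x = (blocks ++ [cur], [x]) := by
        simp [pvAStep, hx]
      rw [List.foldl_cons, hstep, ih]
      rcases Decidable.em (xs = []) with h0 | h0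
      · subst h0
        simp [split_into_year_blocks_alt, pvBStep, pvGlue, hx]
      · obtain ⟨h, b, rest, hsh⟩ := alt_shape xs h0
        rw [hsh]
        by_cases hc : h.1 ≥ x.1
        · simp [pvBStep, pvGlue, hc, hx, not_lt.mpr hc]
        · simp [pvBStep, pvGlue, hc, hx, lt_of_not_ge hc]
    · have hstep : pvAStep (blocks, cur) x = (blocks, cur ++ [x]) := by
        simp [pvAStep, hx]
      rw [List.foldl_cons, hstep, ih]
      rcases Decidable.em (xs = []) with h0 | h0
      · subst h0
        simp [split_into_year_blocks_alt, pvBStep, pvGlue, hx]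
      · obtain ⟨h, b, rest, hsh⟩ := alt_shape xs h0
        rw [hsh]
        by_cases hc : h.1 ≥ x.1
        · simp [pvBStep, pvGlue, hc, hx, not_lt.mpr hc]
        · simp [pvBStep, pvGlue, hc, hx, lt_of_not_ge hc]

lemma glue_single (r0 : Int × String) (xs : List (Int × String)) :
    pvGlue [r0] (split_into_year_blocks_alt xs) = pvBStep (split_into_year_blocks_alt xs) r0 := by
  rcases Decidable.em (xs = []) with h0 | h0
  · subst h0; simp [split_into_year_blocks_alt, pvGlue, pvBStep]
  · obtain ⟨h, b, rest, hsh⟩ := alt_shape xs h0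
    rw [hsh]
    by_cases hc : h.1 ≥ r0.1
    · simp [pvGlue, pvBStep, hc, not_lt.mpr hc]
    · simp [pvGlue, pvBStep, hc, lt_of_not_ge hc]

-- ===== VERDICT (by name: the statement is the Claim_ definition above) =====
theorem split_into_year_blocks_spec : Claim_equal_split_into_year_blocks := by
  intro rows _
  unfold Spec_split_into_year_blocks
  match rows with
  | [] => simp [split_into_year_blocks, split_into_year_blocks_alt]
  | r0 :: rest =>
    show (rest.foldl pvAStep ([], [r0])).1 ++ [(rest.foldl pvAStep ([], [r0])).2] = _
    rw [pv_main, glue_single, ← alt_cons]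
    simp
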